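-- pv_equiv track=rewrite | github.com/ViktorHura/Bioinformatics-MSA | MSA.py | parseLocalAlignments
-- ===== SOURCE A (Python) =====
-- def parseLocalAlignments(sequences, path):
--     # [alignment, position of first consumed letter, position of last consumed letter]
--     alignments = [["", None, None] for s in sequences]
--     maxRPad = 0
--     maxLPad = 0
--
--     for node in path:
--         delta = node[0]
--         for pos, coord in enumerate(delta):
--             sequence = sequences[pos]
--             letter_index = node[1][pos]
--             letter_to_consume = sequence[letter_index]
--             alignments[pos][0] += "." if coord == 0 else letter_to_consume
--             # update position of first consumed letter
--             if alignments[pos][1] == None and coord != 0: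
--                 alignments[pos][1] = letter_index
--             # update position of last consumed letter
--             if coord != 0:
--                 alignments[pos][2] = letter_index
--
--     for i, a in enumerate(alignments):
--         left_residue = sequences[i][1:a[1]]
--         right_residue = sequences[i][a[2]+1:]
--
--         lpadlen = len(left_residue)
--         rpadlen = len(right_residue)
--         if lpadlen > maxLPad:
--             maxLPad = lpadlen
--         if rpadlen > maxRPad:
--             maxRPad = rpadlen
--
--         # pad the alignment with residue and save how much we padded in a[1] and a[2]
--         alignments[i][0] = left_residue + alignments[i][0] + right_residue
--         alignments[i][1] = lpadlen
--         alignments[i][2] = rpadlen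
--
--     # pad the alignments with blank space such that the local alignment lies within [maxLPad, len(a)-maxRPad[
--     for i, a in enumerate(alignments):
--         ldif = maxLPad - a[1]
--         rdif = maxRPad - a[2]
--
--         for j in range(ldif):
--             alignments[i][0] = " " + a[0]
--         for j in range(rdif):
--             alignments[i][0] += " "
--
--     return ([a[0] for a in alignments], maxLPad, maxRPad)
-- ===== SOURCE B (Python) =====
-- def parseLocalAlignments(sequences, path):
--     rows = []
--     maxLPad = 0
--     maxRPad = 0
--     for i, s in enumerate(sequences):
--         aln = ""
--         first = None
--         last = None
--         for delta, idxs in path: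
--             if i < len(delta):
--                 c = delta[i]
--                 aln += "." if c == 0 else s[idxs[i]]
--                 if c != 0:
--                     if first is None:
--                         first = idxs[i]
--                     last = idxs[i]
--         left = s[1:first]
--         right = s[last + 1:]
--         if len(left) > maxLPad:
--             maxLPad = len(left)
--         if len(right) > maxRPad:
--             maxRPad = len(right)
--         rows.append((left + aln + right, len(left), len(right)))
--     return ([" " * (maxLPad - l) + t + " " * (maxRPad - r) for t, l, r in rows],
--             maxLPad, maxRPad)
-- ===== Notes on version B (the rewrite author's own statement) =====
-- stated objective: alternative
-- what changed: Transposed to a row-major (per-sequence) traversal: for each sequence one scan over all path nodes builds its alignment and first/last consumed indices, fused in the same iteration with the residue-padding and running-maximum computation, replacing A's node-major consumption loop followed by two separate index-mutation passes; only the final blank-padding remains a trailing map.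
import Mathlib
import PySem

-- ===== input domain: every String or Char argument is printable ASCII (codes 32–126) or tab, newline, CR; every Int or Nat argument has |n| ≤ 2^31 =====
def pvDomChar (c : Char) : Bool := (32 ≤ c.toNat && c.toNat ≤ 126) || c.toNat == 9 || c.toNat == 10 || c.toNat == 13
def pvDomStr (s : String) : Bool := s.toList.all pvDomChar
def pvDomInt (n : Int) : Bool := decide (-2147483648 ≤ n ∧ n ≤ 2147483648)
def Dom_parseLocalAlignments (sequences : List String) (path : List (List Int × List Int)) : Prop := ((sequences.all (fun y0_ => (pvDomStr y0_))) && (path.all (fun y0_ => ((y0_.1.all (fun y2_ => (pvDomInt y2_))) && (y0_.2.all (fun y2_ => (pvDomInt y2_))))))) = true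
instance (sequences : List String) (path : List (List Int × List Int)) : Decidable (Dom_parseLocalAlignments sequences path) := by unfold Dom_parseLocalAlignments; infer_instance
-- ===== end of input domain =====

-- B re-implements A with a row-major (per-sequence) pass that fuses A's node-major
-- consumption loop and its residue/maximum pass; only the blank padding stays a final map.


-- ===== PORT A =====
-- Port of A (node-major: consume letters node by node into a row table, then a residue/max
-- pass, then a blank-padding pass). Alignment strings are built as List Char and packed with
-- String.ofList at the very end; a row is (chars, first consumed index, last consumed index).
def pvRowD : List Char × Option Int × Option Int := ([], none, none)

def pvConsume (sequences : List String) (node : List Int × List Int) (pos : Nat) (coord : Int)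
    (r : List Char × Option Int × Option Int) : List Char × Option Int × Option Int :=
  let sequence := (sequences.getD pos "").toList
  let letterIndex := node.2.getD pos 0
  let letter := (PySem.List.pyGet? sequence letterIndex).getD ' '
  (r.1 ++ [if coord = 0 then '.' else letter],
   if r.2.1 = none ∧ coord ≠ 0 then some letterIndex else r.2.1,
   if coord ≠ 0 then some letterIndex else r.2.2)

def pvStepNode (sequences : List String) (st : List (List Char × Option Int × Option Int))
    (node : List Int × List Int) : List (List Char × Option Int × Option Int) :=
  (PySem.List.enumerate node.1).foldl
    (fun st pc =>
      st.set pc.1.toNat (pvConsume sequences node pc.1.toNat pc.2 (st.getD pc.1.toNat pvRowD))) st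

def pvResidue (sequences : List String)
    (acc : List (List Char × Int × Int) × Int × Int)
    (ia : Int × (List Char × Option Int × Option Int)) :
    List (List Char × Int × Int) × Int × Int :=
  let s := (sequences.getD ia.1.toNat "").toList
  let a := ia.2
  let left := PySem.List.slice s (some 1) a.2.1
  let right := PySem.List.slice s (some (a.2.2.getD 0 + 1)) none
  let lpadlen : Int := left.length
  let rpadlen : Int := right.length
  (acc.1 ++ [(left ++ a.1 ++ right, lpadlen, rpadlen)],
   if lpadlen > acc.2.1 then lpadlen else acc.2.1,
   if rpadlen > acc.2.2 then rpadlen else acc.2.2)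

def pvPad (maxL maxR : Int) (out : List (List Char × Int × Int)) (a : List Char × Int × Int) :
    List (List Char × Int × Int) :=
  let ldif := maxL - a.2.1
  let rdif := maxR - a.2.2
  let s1 := (PySem.List.pyRange 0 ldif 1).foldl (fun s _ => ' ' :: s) a.1
  let s2 := (PySem.List.pyRange 0 rdif 1).foldl (fun s _ => s ++ [' ']) s1
  out ++ [(s2, a.2.1, a.2.2)]

def parseLocalAlignments (sequences : List String) (path : List (List Int × List Int)) :
    List String × Int × Int :=
  let st1 := path.foldl (pvStepNode sequences) (sequences.map (fun _ => pvRowD))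
  let p2 := (PySem.List.enumerate st1).foldl (pvResidue sequences) ([], 0, 0)
  let rows := p2.1.foldl (pvPad p2.2.1 p2.2.2) []
  (rows.map (fun a => String.ofList a.1), p2.2.1, p2.2.2)

-- ===== PORT B =====
-- Port of B (row-major: one scan over path per sequence, fused with residue padding and the
-- running maxima; a trailing map adds the blank padding).
def pvSpaces (n : Int) : List Char := List.replicate n.toNat ' '

def pvScan (i : Nat) (s : List Char) (acc : List Char × Option Int × Option Int)
    (node : List Int × List Int) : List Char × Option Int × Option Int :=
  if i < node.1.length then
    let c := node.1.getD i 0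
    let li := node.2.getD i 0
    (acc.1 ++ [if c = 0 then '.' else (PySem.List.pyGet? s li).getD ' '],
     if c ≠ 0 then (if acc.2.1 = none then some li else acc.2.1) else acc.2.1,
     if c ≠ 0 then some li else acc.2.2)
  else acc

def pvRowOf (path : List (List Int × List Int)) (i : Nat) (s : List Char) :
    List Char × Int × Int :=
  let r := path.foldl (pvScan i s) ([], none, none)
  let left := PySem.List.slice s (some 1) r.2.1
  let right := PySem.List.slice s (some (r.2.2.getD 0 + 1)) none
  (left ++ r.1 ++ right, (left.length : Int), (right.length : Int))

def parseLocalAlignments_alt (sequences : List String) (path : List (List Int × List Int)) :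
    List String × Int × Int :=
  let z := (PySem.List.enumerate sequences).foldl
    (fun acc is =>
      let row := pvRowOf path is.1.toNat is.2.toList
      (acc.1 ++ [row],
       if row.2.1 > acc.2.1 then row.2.1 else acc.2.1,
       if row.2.2 > acc.2.2 then row.2.2 else acc.2.2))
    (([] : List (List Char × Int × Int)), (0 : Int), (0 : Int))
  (z.1.map (fun r => String.ofList (pvSpaces (z.2.1 - r.2.1) ++ r.1 ++ pvSpaces (z.2.2 - r.2.2))),
   z.2.1, z.2.2)

-- ===== PRECONDITION & SPEC =====
-- Pre_ excludes exactly the inputs on which the Python A raises: a node whose delta row is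
-- longer than sequences or than its index row (IndexError), a consumed-letter index outside
-- Python's index range for its sequence (IndexError), and a sequence no node consumes a letter
-- of, where A computes None + 1 (TypeError).
def Pre_parseLocalAlignments (sequences : List String) (path : List (List Int × List Int)) : Prop :=
  (∀ node ∈ path, node.1.length ≤ sequences.length ∧ node.1.length ≤ node.2.length ∧
     ∀ pos : Nat, pos < node.1.length →
       PySem.Raise.InRange (sequences.getD pos "").toList.length (node.2.getD pos 0)) ∧
  (∀ i : Nat, i < sequences.length → ∃ node ∈ path, i < node.1.length ∧ node.1.getD i 0 ≠ 0)
instance (sequences : List String) (path : List (List Int × List Int)) : Decidable (Pre_parseLocalAlignments sequences path) := by unfold Pre_parseLocalAlignments; infer_instance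

def pvWitness_parseLocalAlignments : List String × (List (List Int × List Int)) :=
  (["ab", "xyz"], [([1, 1], [0, 1]), ([0, 1], [1, 2])])

def Spec_parseLocalAlignments (sequences : List String) (path : List (List Int × List Int)) (out : List String × Int × Int) : Prop := out = parseLocalAlignments_alt sequences path
instance (sequences : List String) (path : List (List Int × List Int)) (out : List String × Int × Int) : Decidable (Spec_parseLocalAlignments sequences path out) := by unfold Spec_parseLocalAlignments; infer_instance

-- ===== CLAIM (what is proved, stated in full; the proofs are below) =====
def Claim_equal_parseLocalAlignments : Prop := ∀ (sequences : List String) (path : List (List Int × List Int)), Dom_parseLocalAlignments sequences path → Pre_parseLocalAlignments sequences path → Spec_parseLocalAlignments sequences path (parseLocalAlignments sequences path)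

-- ===== LEMMAS AND PROOFS =====

-- the per-node inner loop preserves the length of the row table
theorem pvFoldSet_length (l : List (Int × Int))
    (f : List (List Char × Option Int × Option Int) → Int × Int → List Char × Option Int × Option Int)
    (st : List (List Char × Option Int × Option Int)) :
    (l.foldl (fun st pc => st.set pc.1.toNat (f st pc)) st).length = st.length := by
  induction l generalizing st with
  | nil => rfl
  | cons x xs ih => simp [List.foldl_cons, ih]

theorem pvStepNode_length (sequences : List String) (st : List (List Char × Option Int × Option Int))
    (node : List Int × List Int) : (pvStepNode sequences st node).length = st.length := by
  unfold pvStepNode; exact pvFoldSet_length _ _ st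

theorem pvGetD_set {α : Type} (st : List α) (j i : Nat) (v d : α) :
    (st.set j v).getD i d = if j = i ∧ j < st.length then v else st.getD i d := by
  rw [List.getD_eq_getElem?_getD, List.getD_eq_getElem?_getD, List.getElem?_set]
  by_cases h1 : j = i
  · subst h1
    by_cases h2 : j < st.length
    · simp [h2]
    · simp [h2]
  · simp [h1]

-- pointwise effect of the inner enumerate/set loop
theorem pvInner_getD (sequences : List String) (node : List Int × List Int)
    (l : List Int) (s : Nat) (st : List (List Char × Option Int × Option Int)) (i : Nat)
    (h : s + l.length ≤ st.length) :
    ((PySem.List.enumerate l (s : Int)).foldl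
      (fun st pc => st.set pc.1.toNat (pvConsume sequences node pc.1.toNat pc.2 (st.getD pc.1.toNat pvRowD))) st).getD i pvRowD
    = if s ≤ i ∧ i < s + l.length then
        pvConsume sequences node i (l.getD (i - s) 0) (st.getD i pvRowD)
      else st.getD i pvRowD := by
  induction l generalizing s st with
  | nil =>
      have hc : ¬ (s ≤ i ∧ i < s + ([] : List Int).length) := by simp
      rw [if_neg hc]; rfl
  | cons x xs ih =>
      simp only [List.length_cons] at h
      rw [PySem.List.enumerate_cons, List.foldl_cons]
      have hcast : (s : Int) + 1 = ((s + 1 : Nat) : Int) := by push_cast; ring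
      simp only [Int.toNat_natCast]
      rw [hcast, ih (s + 1) _ (by rw [List.length_set]; omega)]
      rw [pvGetD_set]
      rcases Nat.lt_trichotomy i s with hlt | heq | hgt
      · have c1 : ¬ (s + 1 ≤ i ∧ i < s + 1 + xs.length) := by omega
        have c2 : ¬ (s ≤ i ∧ i < s + (x :: xs).length) := by simp; omega
        have c3 : ¬ (s = i ∧ s < st.length) := by omega
        rw [if_neg c1, if_neg c2, if_neg c3]
      · subst heq
        have c1 : ¬ (i + 1 ≤ i ∧ i < i + 1 + xs.length) := by omega
        have c2 : i ≤ i ∧ i < i + (x :: xs).length := by simp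
        have c3 : i = i ∧ i < st.length := ⟨rfl, by omega⟩
        rw [if_neg c1, if_pos c2, if_pos c3]
        simp
      · have c3 : ¬ (s = i ∧ s < st.length) := by omega
        rw [if_neg c3]
        have hsub : i - s = (i - (s + 1)) + 1 := by omega
        by_cases hin : i < s + 1 + xs.length
        · have c1 : s + 1 ≤ i ∧ i < s + 1 + xs.length := ⟨by omega, hin⟩
          have c2 : s ≤ i ∧ i < s + (x :: xs).length := by simp; omega
          rw [if_pos c1, if_pos c2, hsub, List.getD_cons_succ]
        · have c1 : ¬ (s + 1 ≤ i ∧ i < s + 1 + xs.length) := by omega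
          have c2 : ¬ (s ≤ i ∧ i < s + (x :: xs).length) := by simp; omega
          rw [if_neg c1, if_neg c2]

theorem pvStepNode_getD (sequences : List String) (st : List (List Char × Option Int × Option Int))
    (node : List Int × List Int) (i : Nat) (h : node.1.length ≤ st.length) :
    (pvStepNode sequences st node).getD i pvRowD
    = if i < node.1.length then pvConsume sequences node i (node.1.getD i 0) (st.getD i pvRowD)
      else st.getD i pvRowD := by
  have := pvInner_getD sequences node node.1 0 st i (by omega)
  unfold pvStepNode
  simpa using this

-- A's consumption step at a fixed row i is B's scan step
theorem pvConsume_eq_scan (sequences : List String) (node : List Int × List Int) (i : Nat)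
    (r : List Char × Option Int × Option Int) :
    (if i < node.1.length then pvConsume sequences node i (node.1.getD i 0) r else r)
    = pvScan i ((sequences.getD i "").toList) r node := by
  by_cases h : i < node.1.length
  · simp only [pvConsume, pvScan, h, if_pos]
    by_cases hc : node.1.getD i 0 = 0
    · by_cases hr : r.2.1 = none <;> simp [hr]
    · by_cases hr : r.2.1 = none <;> simp [hr]
  · simp only [pvConsume, pvScan, h, if_neg, not_false_iff]


-- pointwise effect of A's whole phase-1 fold: row i evolves by B's scan over the path
theorem pvPhase1_getD (sequences : List String) (path : List (List Int × List Int))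
    (st : List (List Char × Option Int × Option Int)) (i : Nat)
    (h : ∀ node ∈ path, node.1.length ≤ st.length) :
    (path.foldl (pvStepNode sequences) st).getD i pvRowD
    = path.foldl (pvScan i ((sequences.getD i "").toList)) (st.getD i pvRowD) := by
  induction path generalizing st with
  | nil => rfl
  | cons node rest ih =>
      simp only [List.foldl_cons]
      rw [ih _ (fun n hn => by rw [pvStepNode_length]; exact h n (List.mem_cons_of_mem _ hn))]
      rw [pvStepNode_getD sequences st node i (h node (List.mem_cons_self))]
      rw [pvConsume_eq_scan]

theorem pvPhase1_length (sequences : List String) (path : List (List Int × List Int))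
    (st : List (List Char × Option Int × Option Int)) :
    (path.foldl (pvStepNode sequences) st).length = st.length := by
  induction path generalizing st with
  | nil => rfl
  | cons node rest ih => simp [List.foldl_cons, ih, pvStepNode_length]

-- A's phase-1 table, as a map over the enumerated sequences
theorem pvPhase1_eq_map (sequences : List String) (path : List (List Int × List Int))
    (h : ∀ node ∈ path, node.1.length ≤ sequences.length) :
    path.foldl (pvStepNode sequences) (sequences.map (fun _ => pvRowD))
    = (PySem.List.enumerate sequences).map
        (fun is => path.foldl (pvScan is.1.toNat is.2.toList) pvRowD) := by
  apply List.ext_getElem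
  · simp [pvPhase1_length, PySem.List.length_enumerate]
  · intro k h1 h2
    rw [← List.getD_eq_getElem _ pvRowD h1]
    rw [pvPhase1_getD sequences path _ k (fun n hn => by simpa using h n hn)]
    have hk : k < sequences.length := by
      simpa [pvPhase1_length] using h1
    have hinit : (sequences.map (fun _ => pvRowD)).getD k pvRowD = pvRowD := by
      rw [List.getD_eq_getElem?_getD, List.getElem?_map]
      cases sequences[k]? <;> rfl
    rw [hinit, List.getElem_map, PySem.List.getElem_enumerate]
    simp [List.getD_eq_getElem?_getD, List.getElem?_eq_getElem hk]

theorem pvEnumerate_map {α β : Type} (f : α → β) (l : List α) (s : Int) :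
    PySem.List.enumerate (l.map f) s = (PySem.List.enumerate l s).map (fun p => (p.1, f p.2)) := by
  induction l generalizing s with
  | nil => rfl
  | cons x xs ih => simp [PySem.List.enumerate_cons, ih]

theorem pvPrepend_fold {α : Type} (t : List α) (l : List Char) :
    t.foldl (fun s _ => ' ' :: s) l = List.replicate t.length ' ' ++ l := by
  induction t generalizing l with
  | nil => rfl
  | cons x xs ih =>
      simp only [List.foldl_cons, List.length_cons, ih]
      rw [List.replicate_succ', List.append_assoc]; rfl

theorem pvAppend_fold {α : Type} (t : List α) (l : List Char) :
    t.foldl (fun s _ => s ++ [' ']) l = l ++ List.replicate t.length ' ' := by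
  induction t generalizing l with
  | nil => simp
  | cons x xs ih => simp [List.foldl_cons, ih, List.replicate_succ]

theorem pvPad_eq (maxL maxR : Int) (out : List (List Char × Int × Int)) (a : List Char × Int × Int) :
    pvPad maxL maxR out a
    = out ++ [(pvSpaces (maxL - a.2.1) ++ a.1 ++ pvSpaces (maxR - a.2.2), a.2.1, a.2.2)] := by
  show out ++ [((PySem.List.pyRange 0 (maxR - a.2.2) 1).foldl (fun s _ => s ++ [' '])
      ((PySem.List.pyRange 0 (maxL - a.2.1) 1).foldl (fun s _ => ' ' :: s) a.1), a.2.1, a.2.2)] = _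
  rw [pvPrepend_fold, pvAppend_fold]
  simp [pvSpaces, PySem.List.length_pyRange_one, List.append_assoc]

-- A's residue step applied to row i's scan result is B's fused step
theorem pvResidue_eq_step (sequences : List String) (path : List (List Int × List Int))
    (acc : List (List Char × Int × Int) × Int × Int) (p : Int × String)
    (hp : p ∈ PySem.List.enumerate sequences) :
    pvResidue sequences acc (p.1, path.foldl (pvScan p.1.toNat p.2.toList) pvRowD)
    = (acc.1 ++ [pvRowOf path p.1.toNat p.2.toList],
       if (pvRowOf path p.1.toNat p.2.toList).2.1 > acc.2.1 then (pvRowOf path p.1.toNat p.2.toList).2.1 else acc.2.1,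
       if (pvRowOf path p.1.toNat p.2.toList).2.2 > acc.2.2 then (pvRowOf path p.1.toNat p.2.toList).2.2 else acc.2.2) := by
  obtain ⟨k, hk, rfl⟩ := (PySem.List.mem_enumerate_iff _ _ _).1 hp
  have hget : sequences.getD ((0 : Int) + (k : Int)).toNat "" = sequences[k] := by
    simp [List.getD_eq_getElem?_getD, List.getElem?_eq_getElem hk]
  simp only [pvResidue, pvRowOf, pvRowD, hget]

-- A's blank-padding loop is a map
theorem pvPadFold_eq_map (rows : List (List Char × Int × Int)) (mL mR : Int) :
    rows.foldl (pvPad mL mR) []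
    = rows.map (fun a => (pvSpaces (mL - a.2.1) ++ a.1 ++ pvSpaces (mR - a.2.2), a.2.1, a.2.2)) := by
  have hf : pvPad mL mR = fun out a =>
      out ++ [(pvSpaces (mL - a.2.1) ++ a.1 ++ pvSpaces (mR - a.2.2), a.2.1, a.2.2)] :=
    funext fun o => funext fun a => pvPad_eq mL mR o a
  rw [hf, PySem.List.foldl_append_singleton_eq_map]
  rfl

-- the nested-enumerate form of the previous lemma, as A's phase-2 fold produces it
theorem pvResidue_eq_step' (sequences : List String) (path : List (List Int × List Int))
    (acc : List (List Char × Int × Int) × Int × Int) (q : Int × (Int × String))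
    (hq : q ∈ PySem.List.enumerate (PySem.List.enumerate sequences)) :
    pvResidue sequences acc (q.1, path.foldl (pvScan q.2.1.toNat q.2.2.toList) pvRowD)
    = (acc.1 ++ [pvRowOf path q.2.1.toNat q.2.2.toList],
       if (pvRowOf path q.2.1.toNat q.2.2.toList).2.1 > acc.2.1 then (pvRowOf path q.2.1.toNat q.2.2.toList).2.1 else acc.2.1,
       if (pvRowOf path q.2.1.toNat q.2.2.toList).2.2 > acc.2.2 then (pvRowOf path q.2.1.toNat q.2.2.toList).2.2 else acc.2.2) := by
  obtain ⟨k, hk, rfl⟩ := (PySem.List.mem_enumerate_iff _ _ _).1 hq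
  have hk2 : k < sequences.length := by
    simpa [PySem.List.length_enumerate] using hk
  rw [PySem.List.getElem_enumerate]
  exact pvResidue_eq_step sequences path acc ((0 : Int) + (k : Int), sequences[k])
    ((PySem.List.mem_enumerate_iff _ _ _).2 ⟨k, hk2, rfl⟩)

-- ===== VERDICT (by name: the statement is the Claim_ definition above) =====
theorem parseLocalAlignments_spec : Claim_equal_parseLocalAlignments := by
  intro sequences path _ hpre
  have hlen : ∀ node ∈ path, node.1.length ≤ sequences.length := fun n hn => (hpre.1 n hn).1
  unfold Spec_parseLocalAlignments
  simp only [parseLocalAlignments, parseLocalAlignments_alt]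
  rw [pvPhase1_eq_map sequences path hlen, pvEnumerate_map, List.foldl_map]
  have hfold :
      List.foldl (fun x (y : Int × (Int × String)) =>
          pvResidue sequences x (y.1, List.foldl (pvScan y.2.1.toNat y.2.2.toList) pvRowD path))
        ([], 0, 0) (PySem.List.enumerate (PySem.List.enumerate sequences))
      = List.foldl (fun acc (is : Int × String) =>
        (acc.1 ++ [pvRowOf path is.1.toNat is.2.toList],
          if (pvRowOf path is.1.toNat is.2.toList).2.1 > acc.2.1 then (pvRowOf path is.1.toNat is.2.toList).2.1
          else acc.2.1,
          if (pvRowOf path is.1.toNat is.2.toList).2.2 > acc.2.2 then (pvRowOf path is.1.toNat is.2.toList).2.2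
          else acc.2.2))
        ([], 0, 0) (PySem.List.enumerate sequences) := by
    calc List.foldl (fun x (y : Int × (Int × String)) =>
            pvResidue sequences x (y.1, List.foldl (pvScan y.2.1.toNat y.2.2.toList) pvRowD path))
          ([], 0, 0) (PySem.List.enumerate (PySem.List.enumerate sequences))
        = List.foldl (fun acc (q : Int × (Int × String)) =>
          (acc.1 ++ [pvRowOf path q.2.1.toNat q.2.2.toList],
            if (pvRowOf path q.2.1.toNat q.2.2.toList).2.1 > acc.2.1 then (pvRowOf path q.2.1.toNat q.2.2.toList).2.1
            else acc.2.1,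
            if (pvRowOf path q.2.1.toNat q.2.2.toList).2.2 > acc.2.2 then (pvRowOf path q.2.1.toNat q.2.2.toList).2.2
            else acc.2.2))
            ([], 0, 0) (PySem.List.enumerate (PySem.List.enumerate sequences)) :=
          PySem.List.foldl_congr_mem _ _ _ _ (fun acc q hq => pvResidue_eq_step' sequences path acc q hq)
      _ = List.foldl (fun acc (is : Int × String) =>
        (acc.1 ++ [pvRowOf path is.1.toNat is.2.toList],
          if (pvRowOf path is.1.toNat is.2.toList).2.1 > acc.2.1 then (pvRowOf path is.1.toNat is.2.toList).2.1
          else acc.2.1,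
          if (pvRowOf path is.1.toNat is.2.toList).2.2 > acc.2.2 then (pvRowOf path is.1.toNat is.2.toList).2.2
          else acc.2.2)) ([], 0, 0)
            ((PySem.List.enumerate (PySem.List.enumerate sequences)).map (fun q => q.2)) := by
          rw [List.foldl_map]
      _ = _ := by rw [PySem.List.map_snd_enumerate]
  rw [hfold]
  generalize (PySem.List.enumerate sequences).foldl _ (([] : List (List Char × Int × Int)), (0 : Int), (0 : Int)) = z
  rw [pvPadFold_eq_map, List.map_map]
  rfl
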